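-- pv_equiv track=rewrite | github.com/HaoNgo232/Synapse-Desktop | tools/architecture/check_architecture.py | _collect_layer_cycles
-- ===== SOURCE A (Python) =====
-- from typing import Dict, Iterable, List, Set, Tuple
--
-- TARGET_LAYERS = ("domain", "application", "infrastructure", "presentation")
--
-- def _collect_layer_cycles(layer_edges: Dict[str, Set[str]]) -> List[str]:
--     """Phat hien cycle giua cac layer bang DFS."""
--     cycles: Set[str] = set()
--
--     def dfs(node: str, path: List[str], visited_local: Set[str]) -> None:
--         for nxt in layer_edges.get(node, set()):
--             if nxt in path:
--                 cycle = path[path.index(nxt) :] + [nxt]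
--                 cycles.add(" -> ".join(cycle))
--                 continue
--             if nxt in visited_local:
--                 continue
--             dfs(nxt, path + [nxt], visited_local | {nxt})
--
--     for layer in TARGET_LAYERS:
--         dfs(layer, [layer], {layer})
--
--     return sorted(cycles)
-- ===== SOURCE B (Python) =====
-- TARGET_LAYERS = ("domain", "application", "infrastructure", "presentation")
--
-- def _collect_layer_cycles(layer_edges):
--     """Iterative DFS with an explicit worklist of (node, path, visited) frames."""
--     cycles = set()
--     stack = [(layer, [layer], {layer}) for layer in TARGET_LAYERS]
--     while stack:
--         node, path, visited = stack.pop()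
--         for nxt in layer_edges.get(node, set()):
--             if nxt in path:
--                 cycles.add(" -> ".join(path[path.index(nxt):] + [nxt]))
--             elif nxt in visited:
--                 continue
--             else:
--                 stack.append((nxt, path + [nxt], visited | {nxt}))
--     return sorted(cycles)
-- ===== Notes on version B (the rewrite author's own statement) =====
-- stated objective: alternative
-- what changed: The nested recursive dfs helper mutating an outer cycles set is replaced by an iterative DFS over an explicit worklist of (node, path, visited) frames; order of exploration changes but the result is a sorted set, so the output is identical.
import Mathlib
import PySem

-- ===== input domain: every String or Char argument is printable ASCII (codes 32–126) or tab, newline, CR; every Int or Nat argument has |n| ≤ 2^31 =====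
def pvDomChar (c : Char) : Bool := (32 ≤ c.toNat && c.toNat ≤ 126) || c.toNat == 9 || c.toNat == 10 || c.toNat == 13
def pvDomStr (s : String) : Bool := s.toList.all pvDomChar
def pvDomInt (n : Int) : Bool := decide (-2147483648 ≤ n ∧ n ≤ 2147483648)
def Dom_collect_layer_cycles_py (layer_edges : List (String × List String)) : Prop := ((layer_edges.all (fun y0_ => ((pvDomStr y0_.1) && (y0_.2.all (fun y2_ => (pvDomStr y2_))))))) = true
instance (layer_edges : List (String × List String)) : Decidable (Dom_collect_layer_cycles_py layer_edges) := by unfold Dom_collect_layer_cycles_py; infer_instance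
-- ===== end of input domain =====

-- B replaces the nested recursive dfs (mutating an outer cycles set) by an iterative DFS over an
-- explicit worklist of (node, path, visited) frames; the output goes through set+sorted, so the
-- changed exploration order leaves the return value identical (objective: alternative).

-- TARGET_LAYERS (shared module constant)
def pvTargets : List String := ["domain", "application", "infrastructure", "presentation"]

-- layer_edges.get(node, set()): first-match association-list lookup with default
def pvChildren (layer_edges : List (String × List String)) (node : String) : List String :=
  (PySem.Dict.mk layer_edges).getD node []

-- " -> ".join(path[path.index(nxt):] + [nxt])  (used verbatim by both Pythons)
def pvCycleStr (path : List String) (nxt : String) : String :=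
  PySem.Str.join " -> "
    (PySem.List.slice path (some (((PySem.List.index? path nxt).getD 0 : Nat) : Int)) none ++ [nxt])

-- all strings occurring in the edge targets (termination measure universe)
def pvU (layer_edges : List (String × List String)) : List String :=
  (layer_edges.map Prod.snd).flatten

-- number of universe strings not yet visited
def pvRem (layer_edges : List (String × List String)) (visited : PySem.Set String) : Nat :=
  ((pvU layer_edges).filter (fun x => !decide (x ∈ visited))).length

theorem pvGet?_mk_mem {E : List (String × List String)} {x : String} {l : List String}
    (h : (PySem.Dict.mk E).get? x = some l) : l ∈ E.map Prod.snd := by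
  induction E with
  | nil => simp [PySem.Dict.get?] at h
  | cons p rest ih =>
    rw [show (p : String × List String) = (p.1, p.2) from rfl, PySem.Dict.get?_mk_cons] at h
    by_cases hx : p.1 == x
    · simp [hx] at h; simp [← h]
    · simp [hx] at h; simp [ih h]

theorem pvChildren_sub (layer_edges : List (String × List String)) (node : String) :
    (∀ x ∈ pvChildren layer_edges node, x ∈ pvU layer_edges) ∧
    (pvChildren layer_edges node).length ≤ (pvU layer_edges).length := by
  unfold pvChildren pvU
  rw [PySem.Dict.getD_eq_get?_getD]
  cases h : (PySem.Dict.mk layer_edges).get? node with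
  | none => simp
  | some l =>
    have hm := pvGet?_mk_mem h
    refine ⟨fun x hx => ?_, ?_⟩
    · exact List.mem_flatten.2 ⟨l, hm, by simpa using hx⟩
    · simp only [Option.getD_some, List.length_flatten]
      exact List.le_sum_of_mem (List.mem_map_of_mem hm)

theorem pvRem_add_lt (layer_edges : List (String × List String)) (visited : PySem.Set String)
    (nxt : String) (hU : nxt ∈ pvU layer_edges) (hv : nxt ∉ visited) :
    pvRem layer_edges (PySem.Set.add visited nxt) < pvRem layer_edges visited := by
  unfold pvRem
  rw [PySem.Set.add_of_not_mem hv]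
  have heq : (pvU layer_edges).filter (fun x => !decide (x ∈ visited ++ [nxt])) =
      ((pvU layer_edges).filter (fun x => !decide (x ∈ visited))).filter (fun x => !decide (x = nxt)) := by
    rw [List.filter_filter]
    apply List.filter_congr
    intro x _
    by_cases h1 : x ∈ visited <;> by_cases h2 : x = nxt <;> simp [h1, h2]
  rw [heq]
  apply List.length_filter_lt_length_iff_exists.2
  exact ⟨nxt, List.mem_filter.2 ⟨hU, by simp [hv]⟩, by simp⟩

-- ===== PORT A =====
-- dfsA/goA transcribe the nested 'def dfs' and its for-loop; cycles is the accumulated set.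
-- goA's extra hypothesis hl is only a termination device (every iterated string is in pvU).
mutual
def dfsA (layer_edges : List (String × List String)) (node : String) (path : List String)
    (visited : PySem.Set String) (cycles : PySem.Set String) : PySem.Set String :=
  goA layer_edges (pvChildren layer_edges node) path visited cycles
    (fun x hx => (pvChildren_sub layer_edges node).1 x hx)
termination_by (pvRem layer_edges visited, (pvChildren layer_edges node).length + 2)
decreasing_by
  exact Prod.Lex.right _ (by omega)

def goA (layer_edges : List (String × List String)) (l : List String) (path : List String)
    (visited : PySem.Set String) (cycles : PySem.Set String)
    (hl : ∀ x ∈ l, x ∈ pvU layer_edges) : PySem.Set String :=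
  match l with
  | [] => cycles
  | nxt :: rest =>
    if nxt ∈ path then
      goA layer_edges rest path visited (PySem.Set.add cycles (pvCycleStr path nxt))
        (fun x hx => hl x (List.mem_cons_of_mem _ hx))
    else if hv : nxt ∈ visited then
      goA layer_edges rest path visited cycles (fun x hx => hl x (List.mem_cons_of_mem _ hx))
    else
      goA layer_edges rest path visited
        (dfsA layer_edges nxt (path ++ [nxt]) (PySem.Set.add visited nxt) cycles)
        (fun x hx => hl x (List.mem_cons_of_mem _ hx))
termination_by (pvRem layer_edges visited, l.length + 1)
decreasing_by
  · exact Prod.Lex.right _ (by simp [List.length_cons])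
  · exact Prod.Lex.right _ (by simp [List.length_cons])
  · exact Prod.Lex.left _ _ (pvRem_add_lt _ _ _ (hl nxt (List.mem_cons_self)) hv)
  · exact Prod.Lex.right _ (by simp [List.length_cons])
end

def collect_layer_cycles_py (layer_edges : List (String × List String)) : List String :=
  PySem.List.sorted
    (pvTargets.foldl
      (fun cycles layer => dfsA layer_edges layer [layer] (PySem.Set.ofList [layer]) cycles)
      PySem.Set.empty)
    (fun x => x) false

-- ===== PORT B =====
-- a worklist frame: (node, path, visited)
abbrev PvFrame : Type := String × List String × PySem.Set String

-- one iteration of Source B's inner 'for nxt in …' loop; the second component is the stack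
-- (Lean list head = Python list end = top of stack, so append becomes cons)
def pvStepB (path : List String) (visited : PySem.Set String)
    (acc : PySem.Set String × List PvFrame) (nxt : String) : PySem.Set String × List PvFrame :=
  if nxt ∈ path then (PySem.Set.add acc.1 (pvCycleStr path nxt), acc.2)
  else if nxt ∈ visited then acc
  else (acc.1, (nxt, path ++ [nxt], PySem.Set.add visited nxt) :: acc.2)

-- frames Source B pushes while scanning l (in scan order; pvStepB conses, hence the reverse below)
def pvNewFrames (path : List String) (visited : PySem.Set String) (l : List String) : List PvFrame :=
  (l.filter (fun nxt => !decide (nxt ∈ path) && !decide (nxt ∈ visited))).map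
    (fun nxt => (nxt, path ++ [nxt], PySem.Set.add visited nxt))

theorem pvFoldB_snd (path : List String) (visited : PySem.Set String) :
    ∀ (l : List String) (c : PySem.Set String) (st : List PvFrame),
      (l.foldl (pvStepB path visited) (c, st)).2 =
        (pvNewFrames path visited l).reverse ++ st := by
  intro l
  induction l with
  | nil => intro c st; simp [pvNewFrames]
  | cons nxt rest ih =>
    intro c st
    simp only [List.foldl_cons, pvStepB, pvNewFrames, List.filter_cons]
    by_cases h1 : nxt ∈ path
    · simp [h1, ih, pvNewFrames]
    · by_cases h2 : nxt ∈ visited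
      · simp [h1, h2, ih, pvNewFrames]
      · simp [h1, h2, ih, pvNewFrames]


-- weight of a frame / of a stack (termination measure for the worklist loop)
def pvW (layer_edges : List (String × List String)) (visited : PySem.Set String) : Nat :=
  ((pvU layer_edges).length + 2) ^ pvRem layer_edges visited

def pvMu (layer_edges : List (String × List String)) (stack : List PvFrame) : Nat :=
  (stack.map (fun f => pvW layer_edges f.2.2)).sum

theorem pvMu_step_lt (layer_edges : List (String × List String)) (node : String)
    (path : List String) (visited : PySem.Set String) (c : PySem.Set String)
    (rest : List PvFrame) :
    pvMu layer_edges
        ((pvChildren layer_edges node).foldl (pvStepB path visited) (c, rest)).2 <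
      pvMu layer_edges ((node, path, visited) :: rest) := by
  rw [pvFoldB_snd]
  unfold pvMu
  simp only [List.map_append, List.sum_append, List.map_cons, List.sum_cons, List.map_reverse,
    List.sum_reverse]
  have hsuff : ((pvNewFrames path visited (pvChildren layer_edges node)).map
      (fun f => pvW layer_edges f.2.2)).sum < pvW layer_edges visited := by
    unfold pvNewFrames
    set F := (pvChildren layer_edges node).filter
      (fun nxt => !decide (nxt ∈ path) && !decide (nxt ∈ visited)) with hF
    rw [List.map_map]
    by_cases hFn : F = []
    · rw [hFn]; simp [pvW]
    · have hmemU : ∀ nxt ∈ F, nxt ∈ pvU layer_edges ∧ nxt ∉ visited := by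
        intro nxt hn
        have h1 := List.mem_filter.1 (hF ▸ hn)
        refine ⟨(pvChildren_sub layer_edges node).1 _ h1.1, ?_⟩
        have := h1.2; simp at this; exact this.2
      obtain ⟨n0, hn0⟩ := List.exists_mem_of_ne_nil F hFn
      have hrem1 : 1 ≤ pvRem layer_edges visited := by
        have := pvRem_add_lt layer_edges visited n0 (hmemU n0 hn0).1 (hmemU n0 hn0).2
        omega
      have hbd : ∀ y ∈ F.map ((fun f => pvW layer_edges f.2.2) ∘
          (fun nxt => ((nxt, path ++ [nxt], visited.add nxt) : PvFrame))),
          y ≤ ((pvU layer_edges).length + 2) ^ (pvRem layer_edges visited - 1) := by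
        intro y hy
        rcases List.mem_map.1 hy with ⟨nxt, hn, rfl⟩
        have hlt := pvRem_add_lt layer_edges visited nxt (hmemU nxt hn).1 (hmemU nxt hn).2
        simp only [Function.comp]
        unfold pvW
        exact Nat.pow_le_pow_right (by omega) (by omega)
      have hsum := List.sum_le_card_nsmul _ _ hbd
      rw [List.length_map] at hsum
      have hlen : F.length ≤ (pvU layer_edges).length := by
        calc F.length ≤ (pvChildren layer_edges node).length := by
              rw [hF]; exact List.length_filter_le _ _
          _ ≤ (pvU layer_edges).length := (pvChildren_sub layer_edges node).2
      have hpow : pvW layer_edges visited =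
          ((pvU layer_edges).length + 2) * ((pvU layer_edges).length + 2) ^ (pvRem layer_edges visited - 1) := by
        unfold pvW
        rw [← pow_succ']
        congr 1
        omega
      rw [hpow]
      calc (F.map _).sum ≤ F.length • ((pvU layer_edges).length + 2) ^ (pvRem layer_edges visited - 1) := hsum
        _ = F.length * _ := by rw [smul_eq_mul]
        _ < ((pvU layer_edges).length + 2) * _ :=
            (Nat.mul_lt_mul_right (Nat.pow_pos (by omega))).2 (by omega)
  omega


-- the while-loop of Source B
def pvRunB (layer_edges : List (String × List String)) (stack : List PvFrame)
    (cycles : PySem.Set String) : PySem.Set String :=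
  match stack with
  | [] => cycles
  | (node, path, visited) :: rest =>
    let r := (pvChildren layer_edges node).foldl (pvStepB path visited) (cycles, rest)
    pvRunB layer_edges r.2 r.1
termination_by pvMu layer_edges stack
decreasing_by
  exact pvMu_step_lt layer_edges node path visited cycles rest

def collect_layer_cycles_py_alt (layer_edges : List (String × List String)) : List String :=
  PySem.List.sorted
    (pvRunB layer_edges
      ((pvTargets.map (fun layer => (layer, [layer], PySem.Set.ofList [layer]))).reverse)
      PySem.Set.empty)
    (fun x => x) false

-- ===== PRECONDITION & SPEC =====
def Spec_collect_layer_cycles_py (layer_edges : List (String × List String)) (out : List String) : Prop := out = collect_layer_cycles_py_alt layer_edges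
instance (layer_edges : List (String × List String)) (out : List String) : Decidable (Spec_collect_layer_cycles_py layer_edges out) := by unfold Spec_collect_layer_cycles_py; infer_instance

-- ===== CLAIM (what is proved, stated in full; the proofs are below) =====
def Claim_equal_collect_layer_cycles_py : Prop := ∀ (layer_edges : List (String × List String)), Dom_collect_layer_cycles_py layer_edges → Spec_collect_layer_cycles_py layer_edges (collect_layer_cycles_py layer_edges)

-- ===== LEMMAS AND PROOFS =====
theorem goA_nil (E : List (String × List String)) (path : List String) (v c : PySem.Set String) (hl) :
    goA E [] path v c hl = c := by
  rw [goA]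

theorem goA_cons (E : List (String × List String)) (nxt : String) (rest : List String)
    (path : List String) (v c : PySem.Set String) (hl) :
    goA E (nxt :: rest) path v c hl =
      (if nxt ∈ path then
        goA E rest path v (PySem.Set.add c (pvCycleStr path nxt)) (fun x hx => hl x (List.mem_cons_of_mem _ hx))
      else if nxt ∈ v then
        goA E rest path v c (fun x hx => hl x (List.mem_cons_of_mem _ hx))
      else
        goA E rest path v (dfsA E nxt (path ++ [nxt]) (PySem.Set.add v nxt) c)
          (fun x hx => hl x (List.mem_cons_of_mem _ hx))) := by
  rw [goA]
  split_ifs with h1 h2 <;> rfl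

theorem dfsA_eq (E : List (String × List String)) (node : String) (path : List String)
    (v c : PySem.Set String) :
    dfsA E node path v c = goA E (pvChildren E node) path v c
      (fun x hx => (pvChildren_sub E node).1 x hx) := by
  rw [dfsA]
theorem mem_goA_acc (layer_edges : List (String × List String)) :
    ∀ (k : Nat) (visited : PySem.Set String), pvRem layer_edges visited ≤ k →
    ∀ (l : List String) (hl : ∀ x ∈ l, x ∈ pvU layer_edges) (path : List String)
      (c : PySem.Set String) (x : String),
      x ∈ goA layer_edges l path visited c hl ↔
        x ∈ c ∨ x ∈ goA layer_edges l path visited PySem.Set.empty hl := by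
  intro k
  induction k with
  | zero =>
    intro visited hk l
    induction l with
    | nil => intro hl path c x; rw [goA_nil, goA_nil]; simp [PySem.Set.empty]
    | cons nxt rest ih =>
      intro hl path c x
      rw [goA_cons, goA_cons]
      by_cases h1 : nxt ∈ path
      · simp only [h1, if_pos]
        rw [ih _ _ (PySem.Set.add c (pvCycleStr path nxt)) x, ih _ _ (PySem.Set.add PySem.Set.empty (pvCycleStr path nxt)) x]
        rw [PySem.Set.mem_add, PySem.Set.mem_add]
        simp [PySem.Set.empty]
        tauto
      · by_cases h2 : nxt ∈ visited
        · simp only [h1, h2, if_neg, if_pos, not_false_iff]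
          exact ih _ _ _ x
        · exfalso
          have hU : nxt ∈ pvU layer_edges := hl nxt List.mem_cons_self
          have := pvRem_add_lt layer_edges visited nxt hU h2
          omega
  | succ k ihk =>
    intro visited hk l
    induction l with
    | nil => intro hl path c x; rw [goA_nil, goA_nil]; simp [PySem.Set.empty]
    | cons nxt rest ih =>
      intro hl path c x
      rw [goA_cons, goA_cons]
      by_cases h1 : nxt ∈ path
      · simp only [h1, if_pos]
        rw [ih _ _ (PySem.Set.add c (pvCycleStr path nxt)) x, ih _ _ (PySem.Set.add PySem.Set.empty (pvCycleStr path nxt)) x]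
        rw [PySem.Set.mem_add, PySem.Set.mem_add]
        simp [PySem.Set.empty]
        tauto
      · by_cases h2 : nxt ∈ visited
        · simp only [h1, h2, if_neg, if_pos, not_false_iff]
          exact ih _ _ _ x
        · simp only [h1, h2, if_neg, not_false_iff]
          have hU : nxt ∈ pvU layer_edges := hl nxt List.mem_cons_self
          have hlt := pvRem_add_lt layer_edges visited nxt hU h2
          have hrem : pvRem layer_edges (PySem.Set.add visited nxt) ≤ k := by omega
          rw [ih _ _ (dfsA layer_edges nxt (path ++ [nxt]) (PySem.Set.add visited nxt) c) x,
              ih _ _ (dfsA layer_edges nxt (path ++ [nxt]) (PySem.Set.add visited nxt) PySem.Set.empty) x]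
          rw [dfsA_eq, dfsA_eq]
          rw [ihk _ hrem _ _ _ c, ihk _ hrem _ _ _ PySem.Set.empty]
          simp [PySem.Set.empty]
          tauto
theorem mem_goA_char (layer_edges : List (String × List String)) :
    ∀ (l : List String) (hl : ∀ x ∈ l, x ∈ pvU layer_edges) (path : List String)
      (visited : PySem.Set String) (x : String),
    x ∈ goA layer_edges l path visited PySem.Set.empty hl ↔
      ∃ nxt ∈ l, (nxt ∈ path ∧ x = pvCycleStr path nxt) ∨
        (nxt ∉ path ∧ nxt ∉ visited ∧
          x ∈ dfsA layer_edges nxt (path ++ [nxt]) (PySem.Set.add visited nxt) PySem.Set.empty) := by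
  intro l
  induction l with
  | nil => intro hl path visited x; rw [goA_nil]; simp [PySem.Set.empty]
  | cons nxt rest ih =>
    intro hl path visited x
    rw [goA_cons, List.exists_mem_cons_iff]
    by_cases h1 : nxt ∈ path
    · simp only [h1, if_pos]
      rw [mem_goA_acc layer_edges (pvRem layer_edges visited) visited le_rfl, ih]
      rw [PySem.Set.mem_add]
      simp [PySem.Set.empty]
    · by_cases h2 : nxt ∈ visited
      · simp only [h1, h2, if_neg, if_pos, not_false_iff]
        rw [ih]
        simp [h2]
      · simp only [h1, h2, if_neg, not_false_iff]
        rw [mem_goA_acc layer_edges (pvRem layer_edges visited) visited le_rfl, ih]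
        simp [h2]
theorem nodup_goA (layer_edges : List (String × List String)) :
    ∀ (k : Nat) (visited : PySem.Set String), pvRem layer_edges visited ≤ k →
    ∀ (l : List String) (hl : ∀ x ∈ l, x ∈ pvU layer_edges) (path : List String)
      (c : PySem.Set String), c.Nodup → (goA layer_edges l path visited c hl).Nodup := by
  intro k
  induction k with
  | zero =>
    intro visited hk l
    induction l with
    | nil => intro hl path c hc; rw [goA_nil]; exact hc
    | cons nxt rest ih =>
      intro hl path c hc
      rw [goA_cons]
      by_cases h1 : nxt ∈ path
      · simp only [h1, if_pos]
        exact ih _ _ _ (PySem.Set.nodup_add _ _ hc)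
      · by_cases h2 : nxt ∈ visited
        · simp only [h1, h2, if_neg, if_pos, not_false_iff]
          exact ih _ _ _ hc
        · exfalso
          have := pvRem_add_lt layer_edges visited nxt (hl nxt List.mem_cons_self) h2
          omega
  | succ k ihk =>
    intro visited hk l
    induction l with
    | nil => intro hl path c hc; rw [goA_nil]; exact hc
    | cons nxt rest ih =>
      intro hl path c hc
      rw [goA_cons]
      by_cases h1 : nxt ∈ path
      · simp only [h1, if_pos]
        exact ih _ _ _ (PySem.Set.nodup_add _ _ hc)
      · by_cases h2 : nxt ∈ visited
        · simp only [h1, h2, if_neg, if_pos, not_false_iff]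
          exact ih _ _ _ hc
        · simp only [h1, h2, if_neg, not_false_iff]
          have hlt := pvRem_add_lt layer_edges visited nxt (hl nxt List.mem_cons_self) h2
          apply ih
          rw [dfsA_eq]
          exact ihk _ (by omega) _ _ _ _ hc
theorem nodup_dfsA (layer_edges : List (String × List String)) (node : String)
    (path : List String) (visited c : PySem.Set String) (hc : c.Nodup) :
    (dfsA layer_edges node path visited c).Nodup := by
  rw [dfsA_eq]
  exact nodup_goA layer_edges _ visited le_rfl _ _ _ _ hc

theorem mem_dfsA_acc (layer_edges : List (String × List String)) (node : String)
    (path : List String) (visited c : PySem.Set String) (x : String) :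
    x ∈ dfsA layer_edges node path visited c ↔
      x ∈ c ∨ x ∈ dfsA layer_edges node path visited PySem.Set.empty := by
  rw [dfsA_eq, dfsA_eq]
  exact mem_goA_acc layer_edges _ visited le_rfl _ _ _ _ _

theorem pvFoldB_fst_mem (path : List String) (visited : PySem.Set String) :
    ∀ (l : List String) (c : PySem.Set String) (st : List PvFrame) (x : String),
      (x ∈ (l.foldl (pvStepB path visited) (c, st)).1 ↔
        x ∈ c ∨ ∃ nxt ∈ l, nxt ∈ path ∧ x = pvCycleStr path nxt) := by
  intro l
  induction l with
  | nil => intro c st x; simp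
  | cons nxt rest ih =>
    intro c st x
    simp only [List.foldl_cons, pvStepB]
    by_cases h1 : nxt ∈ path
    · rw [if_pos h1]
      rw [ih]
      constructor
      · rintro (h | ⟨n, hn, hp, he⟩)
        · rcases (PySem.Set.mem_add _ _ _).1 h with h' | h'
          · exact Or.inl h'
          · exact Or.inr ⟨nxt, List.mem_cons_self, h1, h'⟩
        · exact Or.inr ⟨n, List.mem_cons_of_mem _ hn, hp, he⟩
      · rintro (h | ⟨n, hn, hp, he⟩)
        · exact Or.inl ((PySem.Set.mem_add _ _ _).2 (Or.inl h))
        · rcases List.mem_cons.1 hn with rfl | hn'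
          · exact Or.inl ((PySem.Set.mem_add _ _ _).2 (Or.inr he))
          · exact Or.inr ⟨n, hn', hp, he⟩
    · have step : List.foldl (pvStepB path visited) (if nxt ∈ visited then (c, st) else (c, (nxt, path ++ [nxt], visited.add nxt) :: st)) rest =
          List.foldl (pvStepB path visited) (c, if nxt ∈ visited then st else (nxt, path ++ [nxt], visited.add nxt) :: st) rest := by
        by_cases h2 : nxt ∈ visited <;> simp [h2]
      rw [if_neg h1, step, ih]
      constructor
      · rintro (h | ⟨n, hn, hp, he⟩)
        · exact Or.inl h
        · exact Or.inr ⟨n, List.mem_cons_of_mem _ hn, hp, he⟩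
      · rintro (h | ⟨n, hn, hp, he⟩)
        · exact Or.inl h
        · rcases List.mem_cons.1 hn with rfl | hn'
          · exact absurd hp h1
          · exact Or.inr ⟨n, hn', hp, he⟩

theorem mem_pvRunB (layer_edges : List (String × List String)) :
    ∀ (stack : List PvFrame) (c : PySem.Set String) (x : String),
      x ∈ pvRunB layer_edges stack c ↔
        x ∈ c ∨ ∃ f ∈ stack, x ∈ dfsA layer_edges f.1 f.2.1 f.2.2 PySem.Set.empty := by
  intro stack c
  induction stack, c using pvRunB.induct layer_edges with
  | case1 c => intro x; rw [pvRunB]; simp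
  | case2 c node path visited rest r ih =>
    intro x
    rw [pvRunB]
    show x ∈ pvRunB layer_edges r.2 r.1 ↔ _
    rw [ih]
    rw [List.exists_mem_cons_iff]
    have hfst : x ∈ r.1 ↔ x ∈ c ∨ ∃ nxt ∈ pvChildren layer_edges node,
        nxt ∈ path ∧ x = pvCycleStr path nxt := pvFoldB_fst_mem path visited _ c rest x
    have hsnd := pvFoldB_snd path visited (pvChildren layer_edges node) c rest
    have hframes : ∀ f : PvFrame, f ∈ r.2 ↔ f ∈ rest ∨ ∃ nxt ∈ pvChildren layer_edges node,
        nxt ∉ path ∧ nxt ∉ visited ∧ f = (nxt, path ++ [nxt], PySem.Set.add visited nxt) := by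
      intro f
      rw [hsnd]
      simp only [List.mem_append, List.mem_reverse, pvNewFrames, List.mem_map, List.mem_filter]
      constructor
      · rintro (⟨nxt, ⟨hn, hkeep⟩, rfl⟩ | h)
        · simp at hkeep
          exact Or.inr ⟨nxt, hn, hkeep.1, hkeep.2, rfl⟩
        · exact Or.inl h
      · rintro (h | ⟨nxt, hn, hp, hv, rfl⟩)
        · exact Or.inr h
        · exact Or.inl ⟨nxt, ⟨hn, by simp [hp, hv]⟩, rfl⟩
    rw [hfst]
    have hdfs : x ∈ dfsA layer_edges node path visited PySem.Set.empty ↔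
        ∃ nxt ∈ pvChildren layer_edges node, (nxt ∈ path ∧ x = pvCycleStr path nxt) ∨
          (nxt ∉ path ∧ nxt ∉ visited ∧
            x ∈ dfsA layer_edges nxt (path ++ [nxt]) (PySem.Set.add visited nxt) PySem.Set.empty) := by
      rw [dfsA_eq]
      exact mem_goA_char layer_edges _ _ _ _ x
    rw [hdfs]
    constructor
    · rintro ((hc | ⟨nxt, hn, hp, rfl⟩) | ⟨f, hf, hx⟩)
      · exact Or.inl hc
      · exact Or.inr (Or.inl ⟨nxt, hn, Or.inl ⟨hp, rfl⟩⟩)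
      · rcases (hframes f).1 hf with hf' | ⟨nxt, hn, hp, hv, rfl⟩
        · exact Or.inr (Or.inr ⟨f, hf', hx⟩)
        · exact Or.inr (Or.inl ⟨nxt, hn, Or.inr ⟨hp, hv, hx⟩⟩)
    · rintro (hc | (⟨nxt, hn, ⟨hp, rfl⟩ | ⟨hp, hv, hx⟩⟩ | ⟨f, hf, hx⟩))
      · exact Or.inl (Or.inl hc)
      · exact Or.inl (Or.inr ⟨nxt, hn, hp, rfl⟩)
      · exact Or.inr ⟨(nxt, path ++ [nxt], PySem.Set.add visited nxt),
          (hframes _).2 (Or.inr ⟨nxt, hn, hp, hv, rfl⟩), hx⟩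
      · exact Or.inr ⟨f, (hframes f).2 (Or.inl hf), hx⟩

theorem nodup_pvRunB (layer_edges : List (String × List String)) :
    ∀ (stack : List PvFrame) (c : PySem.Set String), c.Nodup →
      (pvRunB layer_edges stack c).Nodup := by
  intro stack c
  induction stack, c using pvRunB.induct layer_edges with
  | case1 c => intro hc; rw [pvRunB]; exact hc
  | case2 c node path visited rest r ih =>
    intro hc
    rw [pvRunB]
    show (pvRunB layer_edges r.2 r.1).Nodup
    apply ih
    -- first component of the fold is Nodup
    clear ih
    have : ∀ (l : List String) (c0 : PySem.Set String) (st : List PvFrame), c0.Nodup →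
        (l.foldl (pvStepB path visited) (c0, st)).1.Nodup := by
      intro l
      induction l with
      | nil => intro c0 st hc0; exact hc0
      | cons nxt rest' ih' =>
        intro c0 st hc0
        simp only [List.foldl_cons, pvStepB]
        by_cases h1 : nxt ∈ path
        · rw [if_pos h1]; exact ih' _ _ (PySem.Set.nodup_add _ _ hc0)
        · rw [if_neg h1]
          by_cases h2 : nxt ∈ visited
          · rw [if_pos h2]; exact ih' _ _ hc0
          · rw [if_neg h2]; exact ih' _ _ hc0
    exact this _ _ _ hc
theorem mem_foldA (layer_edges : List (String × List String)) :
    ∀ (ts : List String) (c : PySem.Set String) (x : String),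
      x ∈ ts.foldl (fun cycles layer =>
          dfsA layer_edges layer [layer] (PySem.Set.ofList [layer]) cycles) c ↔
        x ∈ c ∨ ∃ t ∈ ts, x ∈ dfsA layer_edges t [t] (PySem.Set.ofList [t]) PySem.Set.empty := by
  intro ts
  induction ts with
  | nil => intro c x; simp
  | cons t rest ih =>
    intro c x
    rw [List.foldl_cons, ih, List.exists_mem_cons_iff, mem_dfsA_acc]
    tauto

theorem nodup_foldA (layer_edges : List (String × List String)) :
    ∀ (ts : List String) (c : PySem.Set String), c.Nodup →
      (ts.foldl (fun cycles layer =>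
          dfsA layer_edges layer [layer] (PySem.Set.ofList [layer]) cycles) c).Nodup := by
  intro ts
  induction ts with
  | nil => intro c hc; exact hc
  | cons t rest ih =>
    intro c hc
    rw [List.foldl_cons]
    exact ih _ (nodup_dfsA _ _ _ _ _ hc)

-- ===== VERDICT (by name: the statement is the Claim_ definition above) =====
theorem collect_layer_cycles_py_spec : Claim_equal_collect_layer_cycles_py := by
  unfold Claim_equal_collect_layer_cycles_py
  intro layer_edges _
  unfold Spec_collect_layer_cycles_py collect_layer_cycles_py collect_layer_cycles_py_alt
  apply PySem.List.sorted_eq_sorted_of_perm _ _ _ (fun a b h => h)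
  apply (List.perm_ext_iff_of_nodup ?_ ?_).2
  · intro a
    rw [mem_foldA, mem_pvRunB]
    simp only [List.mem_reverse, List.mem_map]
    constructor
    · rintro (h | ⟨t, ht, hx⟩)
      · simp [PySem.Set.empty] at h
      · exact Or.inr ⟨(t, [t], PySem.Set.ofList [t]), ⟨t, ht, rfl⟩, hx⟩
    · rintro (h | ⟨f, ⟨t, ht, rfl⟩, hx⟩)
      · simp [PySem.Set.empty] at h
      · exact Or.inr ⟨t, ht, hx⟩
  · exact nodup_foldA _ _ _ List.nodup_nil
  · exact nodup_pvRunB _ _ _ List.nodup_nil
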